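-- pv_equiv track=rewrite | github.com/janmichael88/Leetcode_Monthly_Challenges | 2024_Challenges/May_2024.py | beautifulSubsets
-- ===== SOURCE A (Python) =====
-- from typing import List
--
-- def beautifulSubsets(nums: List[int], k: int) -> int:
--     '''
--     we can examine all subsets using mask
--     keep index i and current mask, and check that adding this index to this subset is allowed
--     then count up the ways, benefit of this solution is that we dont need to sort
--     dont forget counting in n-ary tree recursino problems
--     '''
--     N = len(nums)
--
--     def rec(i,mask,k):
--         if i >= N:
--             if mask != 0:
--                 return 1
--             return 0
--
--         can_add = True
--         #check all in curr mask
--         for j in range(N):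
--             pos_mask = (1 << j)
--             if (mask & pos_mask == 0) or abs(nums[i] - nums[j]) != k:
--                 continue
--             else:
--                 can_add = False
--                 break
--
--         skip = rec(i+1,mask,k)
--         no_skip = 0
--         if can_add:
--             #take i
--             next_mask = mask | (1 << i)
--             no_skip = rec(i+1, next_mask,k)
--
--         return skip + no_skip
--
--     return rec(0,0,k)
-- ===== SOURCE B (Python) =====
-- from typing import List
--
-- def beautifulSubsets(nums: List[int], k: int) -> int:
--     # Iteratively build the list of all k-free subsets (as value lists) by
--     # power-set doubling; answer is their count minus the empty one.
--     subsets = [[]]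
--     for x in nums:
--         subsets += [s + [x] for s in subsets if all(abs(x - y) != k for y in s)]
--     return len(subsets) - 1
-- ===== Notes on version B (the rewrite author's own statement) =====
-- stated objective: alternative
-- what changed: Replaces A's index/bitmask recursion (which rescans all N indices at every node to test compatibility) with an iterative power-set doubling that keeps the list of valid subsets as value lists and extends each by the next element after a check against that subset only.
import Mathlib
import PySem

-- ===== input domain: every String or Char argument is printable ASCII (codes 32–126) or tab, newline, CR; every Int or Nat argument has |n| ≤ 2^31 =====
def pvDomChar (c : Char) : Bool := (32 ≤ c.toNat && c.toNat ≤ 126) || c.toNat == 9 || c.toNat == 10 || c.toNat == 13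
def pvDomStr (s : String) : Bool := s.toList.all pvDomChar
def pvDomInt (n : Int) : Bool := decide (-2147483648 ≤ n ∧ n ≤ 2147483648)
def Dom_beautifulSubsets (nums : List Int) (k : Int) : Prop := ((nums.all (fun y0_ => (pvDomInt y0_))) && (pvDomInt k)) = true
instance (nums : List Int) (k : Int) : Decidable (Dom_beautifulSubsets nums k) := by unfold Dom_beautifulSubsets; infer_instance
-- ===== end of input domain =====

-- B builds the valid subsets iteratively by power-set doubling over values instead of
-- A's index/bitmask recursion with an inner scan over all indices (objective: alternative).

-- ===== PORT A =====
-- inner 'for j in range(N)' loop computing can_add (break ≙ all); indices i, j are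
-- always < N = nums.length here, so getD is exact (Python never raises)
def pvCanAdd (nums : List Int) (k : Int) (N i : Nat) (mask : Nat) : Bool :=
  (List.range N).all (fun j =>
    (mask &&& (1 <<< j) == 0) || (|nums.getD i 0 - nums.getD j 0| != k))

-- rec(i, mask, k) of A, structural on N - i
def pvRec (nums : List Int) (k : Int) (N : Nat) (i : Nat) (mask : Nat) : Int :=
  if _h : N ≤ i then
    (if mask ≠ 0 then 1 else 0)
  else
    let can_add := pvCanAdd nums k N i mask
    let skip := pvRec nums k N (i + 1) mask
    let no_skip := if can_add then pvRec nums k N (i + 1) (mask ||| (1 <<< i)) else 0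
    skip + no_skip
termination_by N - i
decreasing_by all_goals omega

def beautifulSubsets (nums : List Int) (k : Int) : Int :=
  pvRec nums k nums.length 0 0

-- ===== PORT B =====
def beautifulSubsets_alt (nums : List Int) (k : Int) : Int :=
  let subsets := nums.foldl (fun subs x =>
    subs ++ ((subs.filter (fun s => s.all (fun y => |x - y| != k))).map (fun s => s ++ [x]))) [[]]
  (subsets.length : Int) - 1

-- ===== PRECONDITION & SPEC =====
def Spec_beautifulSubsets (nums : List Int) (k : Int) (out : Int) : Prop := out = beautifulSubsets_alt nums k
instance (nums : List Int) (k : Int) (out : Int) : Decidable (Spec_beautifulSubsets nums k out) := by unfold Spec_beautifulSubsets; infer_instance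

-- ===== CLAIM (what is proved, stated in full; the proofs are below) =====
def Claim_equal_beautifulSubsets : Prop := ∀ (nums : List Int) (k : Int), Dom_beautifulSubsets nums k → Spec_beautifulSubsets nums k (beautifulSubsets nums k)

-- ===== LEMMAS AND PROOFS =====

-- number of k-free subsets of xs compatible with the already-chosen values `chosen`
def pvCnt (k : Int) : List Int → List Int → Nat
  | [], _ => 1
  | x :: xs, chosen =>
      pvCnt k xs chosen +
        (if chosen.all (fun y => |x - y| != k) then pvCnt k xs (chosen ++ [x]) else 0)

-- the values of nums at the indices set in mask (in increasing index order)
def pvVals (nums : List Int) (N : Nat) (mask : Nat) : List Int :=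
  ((List.range N).filter (fun j => mask.testBit j)).map (fun j => nums.getD j 0)

theorem pv_and_pow_eq_zero (mask j : Nat) :
    ((mask &&& (1 <<< j) == 0) : Bool) = !(mask.testBit j) := by
  rw [Nat.one_shiftLeft, Nat.and_two_pow]
  cases h : mask.testBit j <;> simp [Nat.pow_eq_zero]

theorem pvCanAdd_eq (nums : List Int) (k : Int) (N i mask : Nat) :
    pvCanAdd nums k N i mask
      = (pvVals nums N mask).all (fun y => |nums.getD i 0 - y| != k) := by
  unfold pvCanAdd pvVals
  rw [List.all_map, List.all_filter]
  congr 1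
  funext j
  rw [pv_and_pow_eq_zero]
  rfl

theorem pvVals_zero (nums : List Int) (N : Nat) : pvVals nums N 0 = [] := by
  simp [pvVals]

theorem pvVals_or (nums : List Int) (N i mask : Nat) (hi : i < N)
    (hb : ∀ j, mask.testBit j = true → j < i) :
    pvVals nums N (mask ||| (1 <<< i)) = pvVals nums N mask ++ [nums.getD i 0] := by
  obtain ⟨m, rfl⟩ : ∃ m, N = (i + 1) + m := ⟨N - (i + 1), by omega⟩
  unfold pvVals
  have hsplit : List.range ((i + 1) + m)
      = List.range (i + 1) ++ (List.range m).map (fun j => (i + 1) + j) := List.range_add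
  have htb : ∀ j, (mask ||| (1 <<< i)).testBit j = (mask.testBit j || decide (i = j)) := by
    intro j
    rw [Nat.testBit_or, Nat.one_shiftLeft, Nat.testBit_two_pow]
  rw [hsplit, List.filter_append, List.filter_append, List.range_succ,
      List.filter_append, List.filter_append]
  have h1 : (List.range i).filter (fun j => (mask ||| (1 <<< i)).testBit j)
      = (List.range i).filter (fun j => mask.testBit j) := by
    apply List.filter_congr
    intro j hj
    rw [htb]
    have : i ≠ j := by simp at hj; omega
    simp [this]
  have h2 : ([i]).filter (fun j => (mask ||| (1 <<< i)).testBit j) = [i] := by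
    have : (mask ||| (1 <<< i)).testBit i = true := by
      rw [htb]; simp
    simp [List.filter, this]
  have h3 : ([i]).filter (fun j => mask.testBit j) = [] := by
    have : mask.testBit i = false := by
      cases h : mask.testBit i with
      | false => rfl
      | true => exact absurd (hb i h) (by omega)
    simp [List.filter, this]
  have h4 : ∀ (m' : Nat) (_ : ∀ j, m'.testBit j = true → j < i + 1),
      ((List.range m).map (fun j => (i + 1) + j)).filter (fun j => m'.testBit j) = [] := by
    intro m' hm
    apply List.filter_eq_nil_iff.mpr
    intro j hj
    simp only [List.mem_map, List.mem_range] at hj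
    obtain ⟨a, _, rfl⟩ := hj
    cases h : m'.testBit ((i + 1) + a) with
    | false => simp
    | true => exact absurd (hm _ h) (by omega)
  have hm1 : ∀ j, (mask ||| (1 <<< i)).testBit j = true → j < i + 1 := by
    intro j h
    rw [htb] at h
    rcases Bool.or_eq_true_iff.mp h with h | h
    · exact Nat.lt_succ_of_lt (hb j h)
    · have := of_decide_eq_true h; omega
  have hm2 : ∀ j, mask.testBit j = true → j < i + 1 := fun j h => Nat.lt_succ_of_lt (hb j h)
  rw [h1, h2, h3, h4 _ hm1, h4 _ hm2]
  simp

-- A's recursion computes pvCnt on the remaining suffix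
theorem pvRec_eq_cnt (nums : List Int) (k : Int) (N : Nat) (hN : N = nums.length) :
    ∀ d i mask, N - i = d → (∀ j, mask.testBit j = true → j < i) →
    pvRec nums k N i mask
      = (pvCnt k (nums.drop i) (pvVals nums N mask) : Int) - (if mask = 0 then 1 else 0) := by
  intro d
  induction d with
  | zero =>
    intro i mask hd hb
    have hiN : N ≤ i := by omega
    rw [pvRec]
    simp only [hiN, dite_true]
    have : nums.drop i = [] := List.drop_eq_nil_of_le (by omega)
    rw [this]
    by_cases h : mask = 0 <;> simp [pvCnt, h]
  | succ d ih =>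
    intro i mask hd hb
    have hiN : i < N := by omega
    have hi : i < nums.length := by omega
    rw [pvRec]
    simp only [Nat.not_le.mpr hiN, dite_false]
    have hdrop : nums.drop i = nums[i] :: nums.drop (i + 1) :=
      List.drop_eq_getElem_cons hi
    have hget : nums.getD i 0 = nums[i] := List.getD_eq_getElem nums 0 hi
    have hb' : ∀ j, (mask ||| (1 <<< i)).testBit j = true → j < i + 1 := by
      intro j h
      rw [Nat.testBit_or, Nat.one_shiftLeft, Nat.testBit_two_pow] at h
      rcases Bool.or_eq_true_iff.mp h with h | h
      · exact Nat.lt_succ_of_lt (hb j h)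
      · have := of_decide_eq_true h; omega
    have hb'' : ∀ j, mask.testBit j = true → j < i + 1 := fun j h => Nat.lt_succ_of_lt (hb j h)
    have hmask' : mask ||| (1 <<< i) ≠ 0 := by
      intro h
      have : (mask ||| (1 <<< i)).testBit i = true := by
        rw [Nat.testBit_or, Nat.one_shiftLeft, Nat.testBit_two_pow]; simp
      rw [h, Nat.zero_testBit] at this
      exact Bool.false_ne_true this
    rw [ih (i+1) mask (by omega) hb'']
    rw [pvCanAdd_eq]
    by_cases hca : (pvVals nums N mask).all (fun y => |nums.getD i 0 - y| != k) = true
    · rw [if_pos hca, ih (i+1) (mask ||| (1 <<< i)) (by omega) hb',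
          pvVals_or nums N i mask hiN hb, if_neg hmask']
      rw [hdrop, pvCnt]
      rw [hget] at hca ⊢
      rw [if_pos hca]
      push_cast
      ring
    · rw [if_neg hca]
      rw [hdrop, pvCnt]
      rw [hget] at hca
      rw [if_neg hca]
      push_cast
      ring

-- B's fold: the length of the accumulated subset list is the sum of pvCnt over it
theorem pv_sum_map_filter (k x : Int) (L : List (List Int)) (g : List Int → Nat) :
    ((L.filter (fun s => s.all (fun y => |x - y| != k))).map g).sum
      = (L.map (fun s => if s.all (fun y => |x - y| != k) then g s else 0)).sum := by
  induction L with
  | nil => rfl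
  | cons s L ih =>
    rw [List.filter_cons]
    by_cases h : (s.all (fun y => |x - y| != k)) = true
    · rw [if_pos h, List.map_cons, List.sum_cons, List.map_cons, List.sum_cons, if_pos h, ih]
    · rw [if_neg h, List.map_cons, List.sum_cons, if_neg h, ih, Nat.zero_add]

theorem pvFold_length (k : Int) (xs : List Int) :
    ∀ L : List (List Int),
    (xs.foldl (fun subs x =>
        subs ++ ((subs.filter (fun s => s.all (fun y => |x - y| != k))).map (fun s => s ++ [x]))) L).length
      = (L.map (fun s => pvCnt k xs s)).sum := by
  induction xs with
  | nil => intro L; simp [pvCnt]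
  | cons x xs ih =>
    intro L
    rw [List.foldl_cons, ih]
    rw [List.map_append, List.sum_append, List.map_map]
    have : ((L.filter (fun s => s.all (fun y => |x - y| != k))).map
              ((fun s => pvCnt k xs s) ∘ (fun s => s ++ [x]))).sum
        = (L.map (fun s => if s.all (fun y => |x - y| != k) then pvCnt k xs (s ++ [x]) else 0)).sum := by
      exact pv_sum_map_filter k x L (fun s => pvCnt k xs (s ++ [x]))
    rw [this, ← List.sum_map_add]
    apply congrArg List.sum
    apply List.map_congr_left
    intro s _
    rw [pvCnt]

-- ===== VERDICT (by name: the statement is the Claim_ definition above) =====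
theorem beautifulSubsets_spec : Claim_equal_beautifulSubsets := by
  intro nums k _
  unfold Spec_beautifulSubsets beautifulSubsets
  have hB : beautifulSubsets_alt nums k = (pvCnt k nums [] : Int) - 1 := by
    unfold beautifulSubsets_alt
    simp [pvFold_length k nums [[]]]
  rw [hB,
    pvRec_eq_cnt nums k nums.length rfl (nums.length - 0) 0 0 rfl (by simp [Nat.zero_testBit]),
    pvVals_zero, List.drop_zero, if_pos rfl]
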